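-- pv_equiv track=rewrite | github.com/afrikanjoe/Yeet | Amazon/Python/numberOfWheels.py | compute_ways_bad
-- ===== SOURCE A (Python) =====
-- def compute_ways_bad(n):
--
--     if(n%2==1):
--         return 0
--     else:
--         count = 0
--         visited = []
--         queue = [(n,{2:0,4:0})]
--         while queue:
--             fleet_combo = queue.pop()
--             wheels_left , curr_comb = fleet_combo[0], fleet_combo[1]
--             if(wheels_left==0):
--                 if(curr_comb not in visited):
--                     count+=1
--                     visited.append(curr_comb)
--             else:
--                 for i in range(2,6,2):
--                     if((wheels_left-i)>=0):
--                         new_comb = dict(curr_comb)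
--                         new_comb[i]+=1
--                         queue.append((wheels_left-i,new_comb))
--         return count
-- ===== SOURCE B (Python) =====
-- def compute_ways_bad(n):
--     # Number of (two-wheeler, four-wheeler) pairs with 2*a + 4*b == n wheels:
--     # none if n is odd or negative, else one combination per four-wheeler count 0..n//4.
--     if n % 2 == 1 or n < 0:
--         return 0
--     return n // 4 + 1
-- ===== Notes on version B (the rewrite author's own statement) =====
-- stated objective: simpler
-- what changed: Replaced the visited-deduplicating DFS over all fleet orderings by the closed form n//4 + 1 (0 for odd or negative n), one combination per possible truck count.
import Mathlib
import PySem

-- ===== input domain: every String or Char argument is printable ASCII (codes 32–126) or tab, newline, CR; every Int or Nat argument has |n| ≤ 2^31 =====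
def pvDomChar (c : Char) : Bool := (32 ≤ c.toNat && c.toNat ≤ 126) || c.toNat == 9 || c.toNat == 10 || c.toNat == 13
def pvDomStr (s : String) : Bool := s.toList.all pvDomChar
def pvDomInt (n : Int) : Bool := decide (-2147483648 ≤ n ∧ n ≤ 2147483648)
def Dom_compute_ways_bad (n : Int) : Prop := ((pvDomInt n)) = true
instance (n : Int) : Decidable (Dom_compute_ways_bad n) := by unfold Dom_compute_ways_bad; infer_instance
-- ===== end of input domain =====

-- B replaces A's visited-deduplicating DFS by the closed form n//4 + 1 (0 for odd
-- or negative n): one combination per possible number of 4-wheelers (objective: simpler).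

-- ===== PORT A =====

-- termination measure for A's while-loop: a queue entry (w, d) weighs 3^max(w,0)
def awWeight (w : Int) : Nat := 3 ^ w.toNat
def awMeasure (queue : List (Int × PySem.Dict Int Int)) : Nat :=
  (queue.map (fun e => awWeight e.1)).sum

theorem awMeasure_cons (w : Int) (d : PySem.Dict Int Int)
    (rest : List (Int × PySem.Dict Int Int)) :
    awMeasure ((w, d) :: rest) = 3 ^ w.toNat + awMeasure rest := by
  simp [awMeasure, awWeight]

theorem three_pow_lt (s : Nat) : 3 ^ s < 3 ^ (s + 2) :=
  Nat.pow_lt_pow_right (by norm_num) (by omega)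

theorem three_pow_add_lt (s : Nat) : 3 ^ s + 3 ^ (s + 2) < 3 ^ (s + 4) := by
  have hx : 1 ≤ 3 ^ s := Nat.one_le_pow _ _ (by norm_num)
  rw [pow_add, pow_add]
  nlinarith

-- the pushed children weigh strictly less than the popped entry (cited by awLoop's decreasing_by)
theorem awStep_lt (w : Int) (d c4 c2 : PySem.Dict Int Int)
    (rest : List (Int × PySem.Dict Int Int)) :
    awMeasure (if w - 4 ≥ 0 then (w - 4, c4) :: (if w - 2 ≥ 0 then (w - 2, c2) :: rest else rest)
      else (if w - 2 ≥ 0 then (w - 2, c2) :: rest else rest)) < awMeasure ((w, d) :: rest) := by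
  rw [awMeasure_cons]
  split_ifs with h4 h2 h2
  · rw [awMeasure_cons, awMeasure_cons]
    have e2 : (w - 2).toNat = (w - 4).toNat + 2 := by omega
    have e0 : w.toNat = (w - 4).toNat + 4 := by omega
    rw [e2, e0]
    have := three_pow_add_lt (w - 4).toNat
    omega
  · omega
  · rw [awMeasure_cons]
    have e0 : w.toNat = (w - 2).toNat + 2 := by omega
    rw [e0]
    have := three_pow_lt (w - 2).toNat
    omega
  · have : 0 < 3 ^ w.toNat := Nat.pow_pos (by norm_num)
    omega

-- A's while-loop. The Lean stack is the REVERSE of Python's queue list: queue.pop()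
-- (pop from the end) is popping the head, queue.append is cons — an exact simulation.
def awLoop (queue : List (Int × PySem.Dict Int Int)) (count : Int)
    (visited : List (PySem.Dict Int Int)) : Int :=
  match queue with
  | [] => count
  | (wheels_left, curr_comb) :: rest =>
    if wheels_left = 0 then
      if visited.contains curr_comb then
        awLoop rest count visited
      else
        awLoop rest (count + 1) (visited ++ [curr_comb])
    else
      -- for i in range(2,6,2): if wheels_left-i >= 0: new_comb = dict(curr_comb);
      -- new_comb[i] += 1; queue.append(...).  Keys 2 and 4 are always present, so
      -- new_comb[i] += 1 is exactly Dict.modify i 0 (· + 1).  Appending the i=2 child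
      -- then the i=4 child to Python's queue is consing in the opposite order here.
      awLoop
        (if wheels_left - 4 ≥ 0 then
            (wheels_left - 4, curr_comb.modify 4 0 (· + 1)) ::
              (if wheels_left - 2 ≥ 0 then
                (wheels_left - 2, curr_comb.modify 2 0 (· + 1)) :: rest else rest)
          else
            (if wheels_left - 2 ≥ 0 then
              (wheels_left - 2, curr_comb.modify 2 0 (· + 1)) :: rest else rest))
        count visited
termination_by awMeasure queue
decreasing_by
  · rw [awMeasure_cons]
    have : 0 < 3 ^ wheels_left.toNat := Nat.pow_pos (by norm_num)
    omega
  · rw [awMeasure_cons]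
    have : 0 < 3 ^ wheels_left.toNat := Nat.pow_pos (by norm_num)
    omega
  · exact awStep_lt wheels_left curr_comb _ _ rest

def compute_ways_bad (n : Int) : Int :=
  if PySem.Int.mod n 2 = 1 then 0
  else awLoop [(n, PySem.Dict.mk [(2, 0), (4, 0)])] 0 []

-- ===== PORT B =====
def compute_ways_bad_alt (n : Int) : Int :=
  if PySem.Int.mod n 2 = 1 ∨ n < 0 then 0
  else PySem.Int.floordiv n 4 + 1

-- ===== PRECONDITION & SPEC =====
def Spec_compute_ways_bad (n : Int) (out : Int) : Prop := out = compute_ways_bad_alt n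
instance (n : Int) (out : Int) : Decidable (Spec_compute_ways_bad n out) := by unfold Spec_compute_ways_bad; infer_instance

-- ===== CLAIM (what is proved, stated in full; the proofs are below) =====
def Claim_equal_compute_ways_bad : Prop := ∀ (n : Int), Dom_compute_ways_bad n → Spec_compute_ways_bad n (compute_ways_bad n)

-- ===== LEMMAS AND PROOFS =====

-- every dict A manipulates has the shape {2: a, 4: b}
def d2 (a b : Int) : PySem.Dict Int Int := PySem.Dict.mk [(2, a), (4, b)]

theorem d2_modify_two (a b : Int) : (d2 a b).modify 2 0 (· + 1) = d2 (a + 1) b := by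
  simp [d2, PySem.Dict.modify, PySem.Dict.insert, PySem.Dict.getD, PySem.Dict.get?,
    PySem.Dict.contains]

theorem d2_modify_four (a b : Int) : (d2 a b).modify 4 0 (· + 1) = d2 a (b + 1) := by
  simp [d2, PySem.Dict.modify, PySem.Dict.insert, PySem.Dict.getD, PySem.Dict.get?,
    PySem.Dict.contains]

theorem d2_getD_two (a b : Int) : (d2 a b).getD 2 0 = a := by
  simp [d2, PySem.Dict.getD, PySem.Dict.get?]

theorem d2_getD_four (a b : Int) : (d2 a b).getD 4 0 = b := by
  simp [d2, PySem.Dict.getD, PySem.Dict.get?]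

theorem dict_beq_iff (d d' : PySem.Dict Int Int) : (d == d') = true ↔ d = d' := by
  cases d with | mk l => cases d' with | mk l' =>
  have h : (PySem.Dict.mk l == PySem.Dict.mk l') = (l == l') := rfl
  rw [h, beq_iff_eq, PySem.Dict.mk.injEq]

theorem dict_contains_iff (visited : List (PySem.Dict Int Int)) (d : PySem.Dict Int Int) :
    visited.contains d = true ↔ d ∈ visited := by
  induction visited with
  | nil => simp
  | cons x xs ih =>
    simp only [List.contains_cons, Bool.or_eq_true, List.mem_cons, ih, dict_beq_iff]

-- the pairs (x, y) with x ≥ a, y ≥ b and 2(x-a) + 4(y-b) = w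
def Rch (w a b : Int) : Finset (Int × Int) :=
  (((Finset.range (w.toNat + 1)) ×ˢ (Finset.range (w.toNat + 1))).filter
    (fun q => 2 * (q.1 : Int) + 4 * (q.2 : Int) = w)).image
    (fun q => (a + (q.1 : Int), b + (q.2 : Int)))

theorem mem_Rch {w a b : Int} {p : Int × Int} :
    p ∈ Rch w a b ↔ a ≤ p.1 ∧ b ≤ p.2 ∧ 2 * (p.1 - a) + 4 * (p.2 - b) = w := by
  simp only [Rch, Finset.mem_image, Finset.mem_filter, Finset.mem_product, Finset.mem_range]
  constructor
  · rintro ⟨q, ⟨⟨hq1, hq2⟩, hq3⟩, rfl⟩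
    refine ⟨by omega, by omega, by omega⟩
  · rintro ⟨h1, h2, h3⟩
    refine ⟨((p.1 - a).toNat, (p.2 - b).toNat), ⟨⟨by omega, by omega⟩, by omega⟩, ?_⟩
    have hp : p = (p.1, p.2) := rfl
    rw [hp, Prod.mk.injEq]
    omega

theorem Rch_zero (a b : Int) : Rch 0 a b = {(a, b)} := by
  ext p
  simp only [mem_Rch, Finset.mem_singleton, Prod.ext_iff]
  omega

theorem Rch_step {w : Int} (hw : ¬ w = 0) (a b : Int) :
    Rch w a b = (if w - 4 ≥ 0 then Rch (w - 4) a (b + 1) else ∅) ∪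
      (if w - 2 ≥ 0 then Rch (w - 2) (a + 1) b else ∅) := by
  ext p
  split_ifs <;> simp [mem_Rch] <;> omega

-- the pairs denoted by the queue / by the visited list
def QU (queue : List (Int × PySem.Dict Int Int)) : Finset (Int × Int) :=
  queue.foldr (fun e s => Rch e.1 (e.2.getD 2 0) (e.2.getD 4 0) ∪ s) ∅

def VS (visited : List (PySem.Dict Int Int)) : Finset (Int × Int) :=
  (visited.map (fun d => (d.getD 2 0, d.getD 4 0))).toFinset

theorem QU_cons (w : Int) (d : PySem.Dict Int Int) (rest : List (Int × PySem.Dict Int Int)) :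
    QU ((w, d) :: rest) = Rch w (d.getD 2 0) (d.getD 4 0) ∪ QU rest := rfl

theorem VS_append (visited : List (PySem.Dict Int Int)) (d : PySem.Dict Int Int) :
    VS (visited ++ [d]) = VS visited ∪ {(d.getD 2 0, d.getD 4 0)} := by
  simp [VS]

theorem mem_VS_iff {visited : List (PySem.Dict Int Int)}
    (hv : ∀ d ∈ visited, ∃ a b : Int, d = d2 a b) (a b : Int) :
    (a, b) ∈ VS visited ↔ d2 a b ∈ visited := by
  simp only [VS, List.mem_toFinset, List.mem_map]
  constructor
  · rintro ⟨d, hd, he⟩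
    obtain ⟨a', b', rfl⟩ := hv d hd
    rw [d2_getD_two, d2_getD_four] at he
    have hab : a' = a ∧ b' = b := by simpa using he
    obtain ⟨rfl, rfl⟩ := hab
    exact hd
  · intro hd
    exact ⟨d2 a b, hd, by rw [d2_getD_two, d2_getD_four]⟩

-- the loop invariant: awLoop returns count + #(pairs reachable from the queue, not yet visited)
theorem awLoop_eq (N : Nat) :
    ∀ (queue : List (Int × PySem.Dict Int Int)) (count : Int)
      (visited : List (PySem.Dict Int Int)),
      awMeasure queue < N →
      (∀ e ∈ queue, ∃ a b : Int, e.2 = d2 a b) →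
      (∀ d ∈ visited, ∃ a b : Int, d = d2 a b) →
      awLoop queue count visited = count + ((QU queue) \ (VS visited)).card := by
  induction N with
  | zero => intro queue _ _ h _ _; omega
  | succ N ih =>
    rintro (_ | ⟨⟨w, d⟩, rest⟩) count visited hm hq hv
    · simp [awLoop, QU]
    · obtain ⟨a, b, hd⟩ := hq (w, d) (List.mem_cons_self ..)
      subst hd
      have hq' : ∀ e ∈ rest, ∃ a b : Int, e.2 = d2 a b :=
        fun e he => hq e (List.mem_cons_of_mem _ he)
      have hmw : 0 < 3 ^ w.toNat := Nat.pow_pos (by norm_num)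
      rw [awMeasure_cons] at hm
      rw [awLoop]
      by_cases hw : w = 0
      · subst hw
        rw [if_pos rfl, QU_cons, d2_getD_two, d2_getD_four, Rch_zero]
        by_cases hc : List.contains visited (d2 a b)
        · rw [if_pos hc, ih rest count visited (by omega) hq' hv]
          have hin : (a, b) ∈ VS visited :=
            (mem_VS_iff hv a b).mpr ((dict_contains_iff visited (d2 a b)).mp hc)
          have hset : ({(a, b)} ∪ QU rest) \ VS visited = QU rest \ VS visited := by
            ext p
            simp only [Finset.mem_sdiff, Finset.mem_union, Finset.mem_singleton]
            constructor
            · rintro ⟨h | h, hnv⟩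
              · exact absurd (h ▸ hin) hnv
              · exact ⟨h, hnv⟩
            · rintro ⟨h, hnv⟩
              exact ⟨Or.inr h, hnv⟩
          rw [hset]
        · rw [if_neg hc]
          have hv' : ∀ e ∈ visited ++ [d2 a b], ∃ a' b' : Int, e = d2 a' b' := by
            intro e he
            rcases List.mem_append.mp he with h | h
            · exact hv e h
            · exact ⟨a, b, by simpa using h⟩
          rw [ih rest (count + 1) (visited ++ [d2 a b]) (by omega) hq' hv',
            VS_append, d2_getD_two, d2_getD_four]
          have hnin : (a, b) ∉ VS visited := fun h =>
            hc ((dict_contains_iff visited (d2 a b)).mpr ((mem_VS_iff hv a b).mp h))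
          have hset : ({(a, b)} ∪ QU rest) \ VS visited =
              insert (a, b) (QU rest \ (VS visited ∪ {(a, b)})) := by
            ext p
            simp only [Finset.mem_sdiff, Finset.mem_union, Finset.mem_singleton,
              Finset.mem_insert]
            constructor
            · rintro ⟨h | h, hnv⟩
              · exact Or.inl h
              · by_cases hp : p = (a, b)
                · exact Or.inl hp
                · exact Or.inr ⟨h, by tauto⟩
            · rintro (rfl | ⟨h, hnv⟩)
              · exact ⟨Or.inl rfl, hnin⟩
              · exact ⟨Or.inr h, by tauto⟩
          rw [hset, Finset.card_insert_of_notMem (by simp)]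
          push_cast
          ring
      · rw [if_neg hw, d2_modify_two, d2_modify_four,
          QU_cons, d2_getD_two, d2_getD_four, Rch_step hw a b]
        have hlt := awStep_lt w (d2 a b) (d2 a (b + 1)) (d2 (a + 1) b) rest
        rw [awMeasure_cons] at hlt
        split_ifs with h4 h2 h2
        · rw [if_pos h4, if_pos h2] at hlt
          rw [ih _ count visited (by omega) ?_ hv]
          · rw [QU_cons, QU_cons, d2_getD_two, d2_getD_four, d2_getD_two, d2_getD_four,
              Finset.union_assoc]
          · intro e he
            rcases List.mem_cons.mp he with h | h
            · exact ⟨a, b + 1, by rw [h]⟩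
            · rcases List.mem_cons.mp h with h' | h'
              · exact ⟨a + 1, b, by rw [h']⟩
              · exact hq' e h'
        · exact absurd (show w - 2 ≥ 0 by omega) h2
        · rw [if_neg h4, if_pos h2] at hlt
          rw [ih _ count visited (by omega) ?_ hv]
          · rw [QU_cons, d2_getD_two, d2_getD_four, Finset.empty_union]
          · intro e he
            rcases List.mem_cons.mp he with h | h
            · exact ⟨a + 1, b, by rw [h]⟩
            · exact hq' e h
        · rw [ih rest count visited (by omega) hq' hv]
          rw [Finset.empty_union, Finset.empty_union]

theorem card_Rch_of_even {n : Int} (hn : 0 ≤ n) (hd : (2 : Int) ∣ n) :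
    ((Rch n 0 0).card : Int) = PySem.Int.floordiv n 4 + 1 := by
  obtain ⟨m, rfl⟩ := hd
  have him : Rch (2 * m) 0 0 =
      (Finset.range ((2 * m).toNat / 4 + 1)).image
        (fun k : Nat => ((m - 2 * (k : Int)), (k : Int))) := by
    ext p
    simp only [mem_Rch, Finset.mem_image, Finset.mem_range]
    constructor
    · rintro ⟨h1, h2, h3⟩
      refine ⟨p.2.toNat, by omega, ?_⟩
      have hp : p = (p.1, p.2) := rfl
      rw [hp, Prod.mk.injEq]
      constructor <;> omega
    · rintro ⟨k, hk, rfl⟩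
      refine ⟨?_, ?_, ?_⟩ <;> dsimp only <;> omega
  rw [him, Finset.card_image_of_injOn, Finset.card_range]
  · rw [PySem.Int.floordiv_eq_ediv_of_pos (by norm_num)]
    omega
  · intro x hx y hy hxy
    have : (x : Int) = (y : Int) := congrArg Prod.snd hxy
    exact_mod_cast this

theorem Rch_neg {n : Int} (hn : n < 0) : Rch n 0 0 = ∅ := by
  ext p
  simp only [mem_Rch, Finset.notMem_empty, iff_false]
  omega

-- ===== VERDICT (by name: the statement is the Claim_ definition above) =====
theorem compute_ways_bad_spec : Claim_equal_compute_ways_bad := by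
  intro n _
  unfold Spec_compute_ways_bad compute_ways_bad compute_ways_bad_alt
  by_cases h1 : PySem.Int.mod n 2 = 1
  · rw [if_pos h1, if_pos (Or.inl h1)]
  · have h2 : PySem.Int.mod n 2 = 0 := by
      have hnn := PySem.Int.mod_nonneg n (b := 2) (by norm_num)
      have hlt := PySem.Int.mod_lt n (b := 2) (by norm_num)
      omega
    have hdvd : (2 : Int) ∣ n := (PySem.Int.mod_eq_zero_iff_dvd n 2).mp h2
    rw [if_neg h1]
    rw [awLoop_eq (awMeasure [(n, PySem.Dict.mk [(2, 0), (4, 0)])] + 1)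
      [(n, PySem.Dict.mk [(2, 0), (4, 0)])] 0 [] (by omega)
      (by rintro e he
          rcases List.mem_singleton.mp he
          exact ⟨0, 0, rfl⟩)
      (by intro d hd; simp at hd)]
    have hq : QU [(n, PySem.Dict.mk [(2, 0), (4, 0)])] = Rch n 0 0 := by
      rw [show PySem.Dict.mk [((2 : Int), (0 : Int)), (4, 0)] = d2 0 0 from rfl, QU_cons,
        d2_getD_two, d2_getD_four]
      simp [QU]
    rw [hq, show VS ([] : List (PySem.Dict Int Int)) = ∅ from rfl, Finset.sdiff_empty]
    by_cases hn : n < 0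
    · rw [Rch_neg hn]
      simp [hn]
    · rw [if_neg (by rintro (h | h); exact h1 h; omega)]
      rw [zero_add]
      exact card_Rch_of_even (by omega) hdvd
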